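-- pv_equiv track=rewrite | github.com/ElchaabiMohamed/InferCode_SVM | NC-5690-python-files/program_2879.py | motPalindrom
-- ===== SOURCE A (Python) =====
-- def motPalindrom(mot):
--   i=0
--   res=True
--   while i<len(mot) and res==True:
--     pl=mot[i]
--     dl=mot[i-1]
--     if pl==dl:
--         res=True
--     else:
--         res=False
--     i+=1
--   return res
-- ===== SOURCE B (Python) =====
-- def motPalindrom(mot):
--     return len(set(mot)) <= 1
-- ===== Notes on version B (the rewrite author's own statement) =====
-- stated objective: simpler
-- what changed: Replaced the index-chasing while loop comparing each character with its (wraparound) predecessor by a single distinct-character count: len(set(mot)) <= 1.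
import Mathlib
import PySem

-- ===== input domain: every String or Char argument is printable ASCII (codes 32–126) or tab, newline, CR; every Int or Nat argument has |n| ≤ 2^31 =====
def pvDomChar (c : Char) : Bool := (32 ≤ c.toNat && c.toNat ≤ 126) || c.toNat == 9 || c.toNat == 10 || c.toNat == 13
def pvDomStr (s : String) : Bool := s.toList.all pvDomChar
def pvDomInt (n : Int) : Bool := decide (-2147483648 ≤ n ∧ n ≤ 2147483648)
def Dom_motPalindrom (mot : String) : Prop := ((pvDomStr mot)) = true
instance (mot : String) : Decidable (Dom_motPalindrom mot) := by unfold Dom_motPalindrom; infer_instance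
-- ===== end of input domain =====

-- B replaces A's predecessor-comparison while loop by a distinct-character count (len(set(mot)) <= 1): simpler.


-- ===== PORT A =====
-- while i < len(mot) and res == True: pl = mot[i]; dl = mot[i-1]; res = (pl == dl); i += 1
-- mot[i] / mot[i-1] always in range inside the loop (i < len), so the .getD default is never used.
def motPalindromLoop (cs : List Char) (i : Nat) (res : Bool) : Bool :=
  if h : i < cs.length ∧ res = true then
    let pl := (PySem.List.pyGet? cs (i : Int)).getD 'a'
    let dl := (PySem.List.pyGet? cs ((i : Int) - 1)).getD 'a'
    motPalindromLoop cs (i + 1) (if pl = dl then true else false)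
  else res
termination_by cs.length - i
decreasing_by omega

def motPalindrom (mot : String) : Bool := motPalindromLoop mot.toList 0 true

-- ===== PORT B =====
-- return len(set(mot)) <= 1
def motPalindrom_alt (mot : String) : Bool :=
  decide ((PySem.Set.ofList mot.toList).length ≤ 1)

-- ===== PRECONDITION & SPEC =====
def Spec_motPalindrom (mot : String) (out : Bool) : Prop := out = motPalindrom_alt mot
instance (mot : String) (out : Bool) : Decidable (Spec_motPalindrom mot out) := by unfold Spec_motPalindrom; infer_instance

-- ===== CLAIM (what is proved, stated in full; the proofs are below) =====
def Claim_equal_motPalindrom : Prop := ∀ (mot : String), Dom_motPalindrom mot → Spec_motPalindrom mot (motPalindrom mot)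

-- ===== LEMMAS AND PROOFS =====

-- abbreviate the (total) indexed read used by the loop
def pvG (cs : List Char) (j : Int) : Char := (PySem.List.pyGet? cs j).getD 'a'

theorem pvLoop_false (cs : List Char) (i : Nat) : motPalindromLoop cs i false = false := by
  unfold motPalindromLoop; simp

theorem pvLoop_char (cs : List Char) :
    ∀ i : Nat, (motPalindromLoop cs i true = true ↔
      ∀ j : Nat, i ≤ j → j < cs.length → pvG cs (j : Int) = pvG cs ((j : Int) - 1)) := by
  intro i
  induction' hn : cs.length - i using Nat.strong_induction_on with n ih generalizing i
  by_cases hi : i < cs.length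
  · rw [motPalindromLoop, dif_pos (⟨hi, rfl⟩ : i < cs.length ∧ true = true)]
    show motPalindromLoop cs (i + 1)
        (if pvG cs (i : Int) = pvG cs ((i : Int) - 1) then true else false) = true ↔ _
    by_cases heq : pvG cs (i : Int) = pvG cs ((i : Int) - 1)
    · rw [if_pos heq, ih (cs.length - (i + 1)) (by omega) (i + 1) rfl]
      constructor
      · intro h j hij hj
        rcases Nat.eq_or_lt_of_le hij with rfl | hlt
        · exact heq
        · exact h j hlt hj
      · intro h j hij hj; exact h j (by omega) hj
    · rw [if_neg heq, pvLoop_false]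
      constructor
      · intro h; exact absurd h (by simp)
      · intro h; exact absurd (h i le_rfl hi) heq
  · rw [motPalindromLoop, dif_neg (fun hc => hi hc.1)]
    constructor
    · intro _ j hij hj; omega
    · intro _; rfl

-- from the consecutive equalities, every element equals cs[0]
theorem pvAllEqZero (cs : List Char)
    (h : ∀ j : Nat, 0 ≤ j → j < cs.length → pvG cs (j : Int) = pvG cs ((j : Int) - 1)) :
    ∀ k : Nat, (hk : k < cs.length) → cs[k] = cs.headD 'a' := by
  intro k
  induction k with
  | zero => intro hk; cases cs with
    | nil => simp at hk
    | cons a t => simp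
  | succ m ihm =>
    intro hk
    have hm : m < cs.length := by omega
    have hstep := h (m + 1) (by omega) hk
    have h1 : pvG cs ((m + 1 : Nat) : Int) = cs[m + 1] := by
      unfold pvG; rw [PySem.List.pyGet?_natCast]
      simp [List.getElem?_eq_getElem hk]
    have h2 : pvG cs (((m + 1 : Nat) : Int) - 1) = cs[m] := by
      have he : ((m + 1 : Nat) : Int) - 1 = ((m : Nat) : Int) := by push_cast; ring
      rw [he]
      unfold pvG; rw [PySem.List.pyGet?_natCast]
      simp [List.getElem?_eq_getElem hm]
    rw [h1, h2] at hstep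
    rw [hstep]; exact ihm hm

theorem pvNodupLenLe (s : List Char) (hnd : s.Nodup) :
    (s.length ≤ 1) ↔ (∀ x ∈ s, ∀ y ∈ s, x = y) := by
  cases s with
  | nil => simp
  | cons a t =>
    cases t with
    | nil => simp
    | cons b u =>
      simp only [List.nodup_cons, List.mem_cons] at hnd
      constructor
      · intro h; simp at h
      · intro h
        exact absurd (h a (by simp) b (by simp)) (fun hab => hnd.1 (by simp [hab]))

theorem pvMain (cs : List Char) :
    motPalindromLoop cs 0 true = decide ((PySem.Set.ofList cs).length ≤ 1) := by
  have hset : ((PySem.Set.ofList cs).length ≤ 1) ↔ (∀ x ∈ cs, ∀ y ∈ cs, x = y) := by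
    rw [pvNodupLenLe _ (PySem.Set.nodup_ofList cs)]
    constructor
    · intro h x hx y hy
      exact h x ((PySem.Set.mem_ofList _ _).mpr hx) y ((PySem.Set.mem_ofList _ _).mpr hy)
    · intro h x hx y hy
      exact h x ((PySem.Set.mem_ofList _ _).mp hx) y ((PySem.Set.mem_ofList _ _).mp hy)
  by_cases hc : ∀ j : Nat, 0 ≤ j → j < cs.length → pvG cs (j : Int) = pvG cs ((j : Int) - 1)
  · -- both sides true
    have hall : ∀ x ∈ cs, ∀ y ∈ cs, x = y := by
      intro x hx y hy
      obtain ⟨kx, hkx, hgx⟩ := List.mem_iff_getElem.mp hx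
      obtain ⟨ky, hky, hgy⟩ := List.mem_iff_getElem.mp hy
      rw [← hgx, ← hgy, pvAllEqZero cs hc kx hkx, pvAllEqZero cs hc ky hky]
    have h1 : motPalindromLoop cs 0 true = true := (pvLoop_char cs 0).mpr hc
    rw [h1, eq_comm, decide_eq_true_iff]
    exact hset.mpr hall
  · -- loop returns false; show the set side is false too
    have h1 : motPalindromLoop cs 0 true = false := by
      cases hb : motPalindromLoop cs 0 true with
      | false => rfl
      | true => exact absurd ((pvLoop_char cs 0).mp hb) hc
    rw [h1, eq_comm, decide_eq_false_iff_not]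
    intro hle
    apply hc
    intro j _ hj
    have hall := hset.mp hle
    have hx : pvG cs (j : Int) ∈ cs := by
      have : PySem.List.pyGet? cs (j : Int) = some cs[j] := PySem.List.pyGet?_ofNat cs j hj
      simp [pvG, this]
    have hy : pvG cs ((j : Int) - 1) ∈ cs := by
      have hne : cs ≠ [] := by intro h; subst h; simp at hj
      by_cases hj0 : j = 0
      · subst hj0
        simp only [pvG, Nat.cast_zero, zero_sub]
        rw [PySem.List.pyGet?_neg_one]
        rw [List.getLast?_eq_some_getLast hne]
        simp [List.getLast_mem]
      · have : ((j : Nat) : Int) - 1 = ((j - 1 : Nat) : Int) := by omega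
        rw [this]
        have hjl : j - 1 < cs.length := by omega
        have : PySem.List.pyGet? cs ((j - 1 : Nat) : Int) = some cs[j-1] := PySem.List.pyGet?_ofNat cs (j-1) hjl
        simp [pvG, this]
    exact hall _ hx _ hy

-- ===== VERDICT (by name: the statement is the Claim_ definition above) =====
theorem motPalindrom_spec : Claim_equal_motPalindrom := by
  intro mot _
  unfold Spec_motPalindrom motPalindrom motPalindrom_alt
  exact pvMain mot.toList
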